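-- pv_equiv track=rewrite | github.com/Rajg6075/NUMERIC-FORECASTING-WEB-APPLICATION | backend/scripts/generate_demo_data.py | get_pana_for_digit
-- ===== SOURCE A (Python) =====
-- def generate_all_pana():
--     """Generate all pana numbers like PanaDashboard"""
--     pana_list = []
--     digit_order = ['1', '2', '3', '4', '5', '6', '7', '8', '9', '0']
--     for i in range(len(digit_order)):
--         for j in range(i, len(digit_order)):
--             for k in range(j, len(digit_order)):
--                 pana_list.append(f"{digit_order[i]}{digit_order[j]}{digit_order[k]}")
--     return pana_list
--
-- def get_digit_sum(num: str) -> int: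
--     """Get digit sum mod 10"""
--     return sum(int(d) for d in num) % 10
--
-- def get_pana_for_digit(digit: int):
--     """Get pana list for a specific digit (like PanaDashboard)"""
--     all_pana = generate_all_pana()
--     filtered = [p for p in all_pana if get_digit_sum(p) == digit]
--
--     # Add triples
--     triples = ['111', '222', '333', '444', '555', '666', '777', '888', '999', '000']
--     for triple in triples:
--         if get_digit_sum(triple) == digit and triple not in filtered:
--             filtered.append(triple)
--
--     # Sort: single, double, triple
--     single = [p for p in filtered if len(set(p)) == 3]
--     double = [p for p in filtered if len(set(p)) == 2]
--     triple = [p for p in filtered if len(set(p)) == 1]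
--
--     return sorted(single) + sorted(double) + sorted(triple)
-- ===== SOURCE B (Python) =====
-- def get_pana_for_digit(digit: int):
--     """Get pana list for a specific digit — generate each class directly."""
--     order = "1234567890"
--
--     def dsum(t):
--         return sum(int(c) for c in t) % 10
--
--     singles = [order[i] + order[j] + order[k]
--                for i in range(10) for j in range(i + 1, 10) for k in range(j + 1, 10)]
--     doubles = []
--     for p in range(10):
--         for q in range(p + 1, 10):
--             x, y = order[p], order[q]
--             doubles.append(x + x + y)
--             doubles.append(x + y + y)
--     triples = [d * 3 for d in order]
--
--     return (sorted(t for t in singles if dsum(t) == digit)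
--             + sorted(t for t in doubles if dsum(t) == digit)
--             + sorted(t for t in triples if dsum(t) == digit))
-- ===== Notes on version B (the rewrite author's own statement) =====
-- stated objective: simpler
-- what changed: B generates the three pana classes directly (singles from strictly increasing index triples, doubles from ordered pairs as xxy/xyy, triples as ddd) instead of generating every digit multiset, re-adding triples redundantly, and splitting by len(set(p)); each class is filtered by digit sum and sorted.
import Mathlib
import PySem

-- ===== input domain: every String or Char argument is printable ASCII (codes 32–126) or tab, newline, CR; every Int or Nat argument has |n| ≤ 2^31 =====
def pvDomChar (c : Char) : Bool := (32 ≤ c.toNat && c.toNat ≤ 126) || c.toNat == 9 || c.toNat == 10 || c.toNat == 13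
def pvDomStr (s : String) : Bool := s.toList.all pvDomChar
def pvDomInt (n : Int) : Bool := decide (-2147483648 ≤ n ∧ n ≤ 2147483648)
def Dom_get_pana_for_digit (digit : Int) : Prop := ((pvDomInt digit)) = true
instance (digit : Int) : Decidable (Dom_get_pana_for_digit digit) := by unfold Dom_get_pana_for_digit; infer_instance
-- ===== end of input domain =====

-- B generates the three pana classes (all-distinct, pair, triple) directly from ordered
-- index combinations instead of generating every multiset and splitting it afterwards,
-- and drops A's redundant "add triples" loop; objective: simpler.


-- ===== PORT A =====

-- digit_order = ['1', '2', '3', '4', '5', '6', '7', '8', '9', '0']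
def pvDigitOrderA : List String := ["1", "2", "3", "4", "5", "6", "7", "8", "9", "0"]

-- generate_all_pana(); the f-string f"{x}{y}{z}" is ported as "".join([x, y, z]) (exact: concatenation)
def generate_all_pana : List String :=
  (PySem.List.pyRange 0 10 1).foldl (fun acc i =>
    (PySem.List.pyRange i 10 1).foldl (fun acc j =>
      (PySem.List.pyRange j 10 1).foldl (fun acc k =>
        acc ++ [PySem.Str.join "" [PySem.List.pyGetD pvDigitOrderA i "",
                                   PySem.List.pyGetD pvDigitOrderA j "",
                                   PySem.List.pyGetD pvDigitOrderA k ""]]) acc) acc) []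

-- get_digit_sum; int(d) via PySem.Int.ofChars? — every call site passes digit characters, so the
-- .getD 0 default is never taken (exact on all inputs this program ever passes)
def get_digit_sum (num : String) : Int :=
  PySem.Int.mod (num.toList.foldl (fun s d => s + (PySem.Int.ofChars? [d]).getD 0) 0) 10

def pvTriplesA : List String := ["111", "222", "333", "444", "555", "666", "777", "888", "999", "000"]

def get_pana_for_digit (digit : Int) : List String :=
  let all_pana := generate_all_pana
  let filtered := all_pana.filter (fun p => get_digit_sum p == digit)
  let filtered := pvTriplesA.foldl
    (fun f t => if get_digit_sum t == digit && !(f.contains t) then f ++ [t] else f) filtered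
  let single := filtered.filter (fun p => PySem.Set.len (PySem.Set.ofList p.toList) == 3)
  let double := filtered.filter (fun p => PySem.Set.len (PySem.Set.ofList p.toList) == 2)
  let triple := filtered.filter (fun p => PySem.Set.len (PySem.Set.ofList p.toList) == 1)
  -- sorted(xs) on str: code-point order = '<' on .toList (PYSEM.md str COMPARISON), used as the sort key
  PySem.List.sorted single (fun s => s.toList) ++ PySem.List.sorted double (fun s => s.toList)
    ++ PySem.List.sorted triple (fun s => s.toList)

-- ===== PORT B =====

-- order = "1234567890" (a string of digit characters, indexed by position)
def pvOrderB : List Char := ['1', '2', '3', '4', '5', '6', '7', '8', '9', '0']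

-- dsum(t); int(c) via PySem.Int.ofChars? — only digit characters reach it, default never taken
def pvDsumB (t : String) : Int :=
  PySem.Int.mod (t.toList.foldl (fun s c => s + (PySem.Int.ofChars? [c]).getD 0) 0) 10

-- singles comprehension: order[i]+order[j]+order[k] built as the 3-char string
def pvSinglesB : List String :=
  (PySem.List.pyRange 0 10 1).flatMap (fun i =>
    (PySem.List.pyRange (i + 1) 10 1).flatMap (fun j =>
      (PySem.List.pyRange (j + 1) 10 1).map (fun k =>
        String.ofList [PySem.List.pyGetD pvOrderB i ' ',
                   PySem.List.pyGetD pvOrderB j ' ',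
                   PySem.List.pyGetD pvOrderB k ' '])))

-- doubles loop: two appends per ordered pair p < q
def pvDoublesB : List String :=
  (PySem.List.pyRange 0 10 1).foldl (fun acc p =>
    (PySem.List.pyRange (p + 1) 10 1).foldl (fun acc q =>
      let x := PySem.List.pyGetD pvOrderB p ' '
      let y := PySem.List.pyGetD pvOrderB q ' '
      acc ++ [String.ofList [x, x, y]] ++ [String.ofList [x, y, y]]) acc) []

-- triples: d * 3 for d in order
def pvTriplesB : List String := pvOrderB.map (fun d => String.ofList [d, d, d])

def get_pana_for_digit_alt (digit : Int) : List String :=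
  -- sorted(xs) on str: code-point order = '<' on .toList (PYSEM.md str COMPARISON), used as the sort key
  PySem.List.sorted (pvSinglesB.filter (fun t => pvDsumB t == digit)) (fun s => s.toList)
    ++ PySem.List.sorted (pvDoublesB.filter (fun t => pvDsumB t == digit)) (fun s => s.toList)
    ++ PySem.List.sorted (pvTriplesB.filter (fun t => pvDsumB t == digit)) (fun s => s.toList)

-- ===== PRECONDITION & SPEC =====
def Spec_get_pana_for_digit (digit : Int) (out : List String) : Prop := out = get_pana_for_digit_alt digit
instance (digit : Int) (out : List String) : Decidable (Spec_get_pana_for_digit digit out) := by unfold Spec_get_pana_for_digit; infer_instance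

-- ===== CLAIM (what is proved, stated in full; the proofs are below) =====
def Claim_equal_get_pana_for_digit : Prop := ∀ (digit : Int), Dom_get_pana_for_digit digit → Spec_get_pana_for_digit digit (get_pana_for_digit digit)

-- ===== LEMMAS AND PROOFS =====

-- every digit sum taken mod 10 lies in [0, 10)
theorem dsum_bounds (s : String) : 0 ≤ get_digit_sum s ∧ get_digit_sum s < 10 := by
  unfold get_digit_sum
  exact ⟨PySem.Int.mod_nonneg _ (by norm_num), PySem.Int.mod_lt _ (by norm_num)⟩

theorem dsumB_bounds (s : String) : 0 ≤ pvDsumB s ∧ pvDsumB s < 10 := by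
  unfold pvDsumB
  exact ⟨PySem.Int.mod_nonneg _ (by norm_num), PySem.Int.mod_lt _ (by norm_num)⟩

-- the "add triples" loop of A does nothing when no digit sum can equal `digit`
theorem triples_foldl_id (digit : Int) (h : digit < 0 ∨ 10 ≤ digit) (ts acc : List String) :
    ts.foldl (fun f t => if get_digit_sum t == digit && !(f.contains t) then f ++ [t] else f) acc
      = acc := by
  induction ts generalizing acc with
  | nil => rfl
  | cons t ts ih =>
    have hne : (get_digit_sum t == digit) = false := by
      have := dsum_bounds t
      simp only [beq_eq_false_iff_ne, ne_eq]
      omega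
    simp only [List.foldl_cons, hne, Bool.false_and, Bool.false_eq_true, if_false]
    exact ih acc

theorem filterA_nil (digit : Int) (h : digit < 0 ∨ 10 ≤ digit) (l : List String) :
    l.filter (fun p => get_digit_sum p == digit) = [] := by
  rw [List.filter_eq_nil_iff]
  intro p _
  have := dsum_bounds p
  simp only [beq_iff_eq]
  omega

theorem filterB_nil (digit : Int) (h : digit < 0 ∨ 10 ≤ digit) (l : List String) :
    l.filter (fun t => pvDsumB t == digit) = [] := by
  rw [List.filter_eq_nil_iff]
  intro p _
  have := dsumB_bounds p
  simp only [beq_iff_eq]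
  omega

theorem out_of_range_eq (digit : Int) (h : digit < 0 ∨ 10 ≤ digit) :
    get_pana_for_digit digit = get_pana_for_digit_alt digit := by
  unfold get_pana_for_digit get_pana_for_digit_alt
  simp only [filterA_nil digit h, filterB_nil digit h, triples_foldl_id digit h]
  rfl

-- ===== VERDICT (by name: the statement is the Claim_ definition above) =====
set_option maxRecDepth 100000 in
theorem get_pana_for_digit_spec : Claim_equal_get_pana_for_digit := by
  intro digit _
  unfold Spec_get_pana_for_digit
  by_cases h0 : 0 ≤ digit ∧ digit < 10
  · obtain ⟨h1, h2⟩ := h0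
    interval_cases digit <;> decide
  · exact out_of_range_eq digit (by omega)
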